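-- pv_equiv track=rewrite | github.com/WilliamSampaio/febraban_barcode | febraban_barcode/functions.py | calc_dac_modulo10
-- ===== SOURCE A (Python) =====
-- def calc_dac_modulo10(sequencia: str) -> int:
--     """
--     O DAC (Dígito de Auto-Conferência) módulo 10, de um número é calculado
--     multiplicando cada algarismo, pela seqüência de multiplicadores 2, 1,
--     2, 1, ... posicionados da direita para a esquerda.
--
--     A soma dos algarismos do produto é dividida por 10 e o DAC será a diferença
--     entre o divisor (10) e o resto da divisão:
--
--         DAC = 10 - (resto da divisão)
--
--     Observação: quando o resto da divisão for 0 (zero), o DAC calculado é o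
--     0 (zero).
--
--     EXEMPLO
--
--     Calcular o DAC módulo 10 da seguinte seqüência de números: 01230067896.
--     A fórmula do cálculo é:
--
--         1. Multiplicação pela sequência 2, 1, 2, 1, ... da direita para a
--         esquerda.
--               0  1  2  3  0  0  6  7  8  9  6
--             X 2  1  2  1  2  1  2  1  2  1  2
--               0  1  4  3  0  0 12  7 16  9 12
--
--         2. Soma dos dígitos do produto
--             0 + 1 + 4 + 3 + 0 + 0 + 1 + 2 + 7 + 1 + 6 + 9 + 1 + 2 = 37
--             Observação: Cada dígito deverá ser somado individualmente.
--
--         3. Divisão do resultado da soma acima por 10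
--             37 : 10 = 3 , resto = 7
--             DAC = 10 - (resto da divisão), portando 10 - 7 = 3
--
--     O DAC da seqüência numérica é igual a “3”.
--     """
--     multiplicador_atual = 2
--     soma = 0
--
--     for element in sequencia[::-1]:
--         resultado = int(element) * multiplicador_atual
--         multiplicador_atual = 1 if multiplicador_atual == 2 else 2
--         if resultado < 10:
--             soma += resultado
--         else:
--             soma += int(resultado / 10)
--             soma += resultado % 10
--
--     resto_divisao = soma % 10
--     if resto_divisao == 0:
--         return resto_divisao
--     return 10 - resto_divisao
-- ===== SOURCE B (Python) =====
-- def calc_dac_modulo10(sequencia: str) -> int: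
--     # Partition the digits by position parity (from the right) using index
--     # arithmetic, then sum via a digit-value histogram: loop over the ten
--     # digit values 0..9 and weigh each count (2*d - 9 if the doubled product
--     # exceeds 9, i.e. d > 4), instead of a stateful right-to-left fold.
--     n = len(sequencia)
--     digits = [int(c) for c in sequencia]
--     dobrados = [d for i, d in enumerate(digits) if (n - 1 - i) % 2 == 0]
--     simples = [d for i, d in enumerate(digits) if (n - 1 - i) % 2 == 1]
--     soma = 0
--     for d in range(10):
--         soma += dobrados.count(d) * (2 * d - 9 * (d > 4)) + simples.count(d) * d
--     resto = soma % 10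
--     return 0 if resto == 0 else 10 - resto
-- ===== Notes on version B (the rewrite author's own statement) =====
-- stated objective: alternative
-- what changed: Replaces A's stateful right-to-left fold (alternating multiplier, splitting the product's digits) by a stateless left-to-right partition of the digits into the two position classes via index arithmetic, followed by a histogram sum: a loop over the ten digit values 0..9 weighing each class's count with a closed-form weight (2*d - 9 for d > 4).
import Mathlib
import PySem

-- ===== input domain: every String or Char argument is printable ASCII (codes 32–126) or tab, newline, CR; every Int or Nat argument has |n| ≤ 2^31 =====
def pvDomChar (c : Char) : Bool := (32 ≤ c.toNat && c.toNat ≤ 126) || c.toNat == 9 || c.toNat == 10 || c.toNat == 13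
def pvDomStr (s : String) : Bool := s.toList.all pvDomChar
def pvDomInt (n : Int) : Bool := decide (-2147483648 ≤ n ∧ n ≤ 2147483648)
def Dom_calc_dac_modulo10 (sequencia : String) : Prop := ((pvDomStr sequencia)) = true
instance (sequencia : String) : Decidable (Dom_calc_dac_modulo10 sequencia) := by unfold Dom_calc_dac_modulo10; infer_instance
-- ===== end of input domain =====

-- B keeps A's return value on digit strings but replaces the stateful right-to-left
-- fold by an index-parity partition of the digits plus a histogram sum over 0..9.

-- ===== PORT A =====
-- int(c) on a one-character string: exact on digit chars '0'..'9' (all Pre_ admits; elsewhere Python raises ValueError)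
def pyDigit (c : Char) : Int := (c.toNat : Int) - 48

-- A's loop body: state (multiplicador_atual, soma).
-- int(resultado / 10): float division then truncation; resultado ∈ [0,18] on Pre_, where it equals floor division.
def stepA (st : Int × Int) (c : Char) : Int × Int :=
  let resultado := pyDigit c * st.1
  let mult := if st.1 == 2 then 1 else 2
  let soma := if resultado < 10 then st.2 + resultado
    else st.2 + PySem.Int.floordiv resultado 10 + PySem.Int.mod resultado 10
  (mult, soma)

def calc_dac_modulo10 (sequencia : String) : Int :=
  -- sequencia[::-1] is the reverse (exact: PySem.List.slice?_none_none_neg_one)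
  let st := sequencia.toList.reverse.foldl stepA (2, 0)
  let resto := PySem.Int.mod st.2 10
  if resto == 0 then resto else 10 - resto

-- ===== PORT B =====
def calc_dac_modulo10_alt (sequencia : String) : Int :=
  let n : Int := PySem.Str.len sequencia
  let digits := sequencia.toList.map pyDigit
  let dobrados := (PySem.List.enumerate digits 0).filterMap
    (fun p => if PySem.Int.mod (n - 1 - p.1) 2 == 0 then some p.2 else none)
  let simples := (PySem.List.enumerate digits 0).filterMap
    (fun p => if PySem.Int.mod (n - 1 - p.1) 2 == 1 then some p.2 else none)
  let soma := (PySem.List.pyRange 0 10 1).foldl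
    (fun acc d => acc + (dobrados.count d : Int) * (2 * d - 9 * (if d > 4 then 1 else 0))
      + (simples.count d : Int) * d) 0
  let resto := PySem.Int.mod soma 10
  if resto == 0 then 0 else 10 - resto

-- ===== PRECONDITION & SPEC =====
-- Pre_ excludes strings containing a non-digit character, on which A's int(element) raises ValueError (B raises there too).
def Pre_calc_dac_modulo10 (sequencia : String) : Prop :=
  sequencia.toList.all (fun c => c.isDigit) = true
instance (sequencia : String) : Decidable (Pre_calc_dac_modulo10 sequencia) := by
  unfold Pre_calc_dac_modulo10; infer_instance

def pvWitness_calc_dac_modulo10 : String := "4750318926"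

def Spec_calc_dac_modulo10 (sequencia : String) (out : Int) : Prop := out = calc_dac_modulo10_alt sequencia
instance (sequencia : String) (out : Int) : Decidable (Spec_calc_dac_modulo10 sequencia out) := by unfold Spec_calc_dac_modulo10; infer_instance

-- ===== CLAIM (what is proved, stated in full; the proofs are below) =====
def Claim_equal_calc_dac_modulo10 : Prop := ∀ (sequencia : String), Dom_calc_dac_modulo10 sequencia → Pre_calc_dac_modulo10 sequencia → Spec_calc_dac_modulo10 sequencia (calc_dac_modulo10 sequencia)

-- ===== LEMMAS AND PROOFS =====
-- the weight a doubled digit contributes (digit sum of 2*d for d in 0..9)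
def w2 (d : Int) : Int := 2 * d - 9 * (if d > 4 then 1 else 0)

-- spec of A's fold over the reversed digit list: weights alternate starting doubled
def sumPairsW : List Int → Int
  | [] => 0
  | [d] => w2 d
  | d :: e :: rest => w2 d + e + sumPairsW rest

-- variant starting undoubled (state mult = 1 in A's fold)
def sumOddW : List Int → Int
  | [] => 0
  | d :: rest => d + sumPairsW rest

lemma sumPairsW_cons (d : Int) (rest : List Int) :
    sumPairsW (d :: rest) = w2 d + sumOddW rest := by
  cases rest <;> simp [sumPairsW, sumOddW]; ring

lemma isDigit_toNat {c : Char} (h : c.isDigit) : 48 ≤ c.toNat ∧ c.toNat ≤ 57 := by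
  rw [Char.isDigit] at h
  simp only [decide_eq_true_eq, Bool.and_eq_true, ge_iff_le] at h
  obtain ⟨h1, h2⟩ := h
  rw [UInt32.le_iff_toNat_le] at h1 h2
  exact ⟨h1, h2⟩

-- the doubled-digit contribution of A's body is the closed-form weight w2
lemma double_key (d : Int) (h0 : 0 ≤ d) (h9 : d ≤ 9) :
    (if d * 2 < 10 then d * 2
      else PySem.Int.floordiv (d * 2) 10 + PySem.Int.mod (d * 2) 10) = w2 d := by
  interval_cases d <;> decide

lemma stepA_two (s : Int) (c : Char) (h : c.isDigit) :
    stepA (2, s) c = (1, s + w2 (pyDigit c)) := by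
  have h48 := isDigit_toNat h
  have hd0 : 0 ≤ pyDigit c := by unfold pyDigit; omega
  have hd9 : pyDigit c ≤ 9 := by unfold pyDigit; omega
  have key := double_key (pyDigit c) hd0 hd9
  unfold stepA
  simp only [show ((2 : Int) == 2) = true from rfl, if_true]
  rw [← key]
  split_ifs with hlt <;> (simp; try ring)

lemma stepA_one (s : Int) (c : Char) (h : c.isDigit) :
    stepA (1, s) c = (2, s + pyDigit c) := by
  have h48 := isDigit_toNat h
  unfold stepA
  have hlt : pyDigit c < 10 := by unfold pyDigit; omega
  simp [hlt]

lemma foldA_sum (l : List Char) (h : ∀ c ∈ l, c.isDigit) : ∀ s : Int,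
    (l.foldl stepA (1, s)).2 = s + sumOddW (l.map pyDigit) ∧
    (l.foldl stepA (2, s)).2 = s + sumPairsW (l.map pyDigit) := by
  induction l with
  | nil => intro s; simp [sumOddW, sumPairsW]
  | cons c rest ih =>
    intro s
    have hc : c.isDigit := h c (by simp)
    have hrest : ∀ x ∈ rest, x.isDigit := fun x hx => h x (by simp [hx])
    constructor
    · rw [List.foldl_cons, stepA_one s c hc, (ih hrest _).2]
      simp [sumOddW]; ring
    · rw [List.foldl_cons, stepA_two s c hc, (ih hrest _).1, List.map_cons,
        sumPairsW_cons]
      ring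

-- shift lemma for enumerate's start index
lemma enumerate_shift {α : Type} (l : List α) : ∀ s : Int,
    PySem.List.enumerate l (s + 1) = (PySem.List.enumerate l s).map (fun p => (p.1 + 1, p.2)) := by
  induction l with
  | nil => intro s; simp [PySem.List.enumerate_nil]
  | cons a t ih =>
    intro s
    rw [PySem.List.enumerate_cons, PySem.List.enumerate_cons, ih (s + 1)]
    simp

-- start-1 corollary of the shift lemma
lemma enumerate_one {α : Type} (l : List α) :
    PySem.List.enumerate l 1 = (PySem.List.enumerate l 0).map (fun p => (p.1 + 1, p.2)) := by
  simpa using enumerate_shift l 0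

-- enumerating the reverse = reversing the enumeration with the index mirrored
lemma enumerate_reverse {α : Type} (l : List α) :
    PySem.List.enumerate l.reverse 0 =
      ((PySem.List.enumerate l 0).map (fun p => ((l.length : Int) - 1 - p.1, p.2))).reverse := by
  induction l with
  | nil => simp [PySem.List.enumerate_nil]
  | cons a t ih =>
    rw [List.reverse_cons, PySem.List.enumerate_append, ih]
    simp only [PySem.List.enumerate_cons, PySem.List.enumerate_nil, List.length_reverse,
      List.length_cons, zero_add]
    rw [enumerate_one t]
    simp only [List.map_cons, List.map_map, List.reverse_cons]
    congr 1
    · exact congrArg List.reverse (List.map_congr_left fun p _ =>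
        Prod.ext (by simp only [Function.comp]; push_cast; ring) rfl)
    · exact congrArg (· :: []) (Prod.ext (by push_cast; ring) rfl)

-- sumPairsW over a list = even-indexed weights + odd-indexed values of its enumeration
lemma sumPairsW_enum (m : List Int) : ∀ s : Int, s % 2 = 0 →
    sumPairsW m =
      (((PySem.List.enumerate m s).filterMap
        (fun p => if p.1 % 2 == 0 then some p.2 else none)).map w2).sum +
      ((PySem.List.enumerate m s).filterMap
        (fun p => if p.1 % 2 == 1 then some p.2 else none)).sum := by
  induction m using sumPairsW.induct with
  | case1 => intro s hs; simp [sumPairsW, PySem.List.enumerate_nil]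
  | case2 d =>
    intro s hs
    have e1 : (if s % 2 == 0 then some d else (none : Option Int)) = some d := by
      simp [hs]
    have e2 : (if s % 2 == 1 then some d else (none : Option Int)) = none := by
      simp [hs]
    rw [PySem.List.enumerate_cons, PySem.List.enumerate_nil]
    simp only [List.filterMap_cons]
    rw [e1, e2]
    simp [sumPairsW]
  | case3 d e rest ih =>
    intro s hs
    have e1 : (if s % 2 == 0 then some d else (none : Option Int)) = some d := by
      simp [hs]
    have e2 : (if s % 2 == 1 then some d else (none : Option Int)) = none := by
      simp [hs]
    have e3 : (if (s + 1) % 2 == 0 then some e else (none : Option Int)) = none := by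
      simp; omega
    have e4 : (if (s + 1) % 2 == 1 then some e else (none : Option Int)) = some e := by
      simp; omega
    rw [PySem.List.enumerate_cons, PySem.List.enumerate_cons]
    simp only [List.filterMap_cons]
    rw [e1, e2, e3, e4]
    simp only [sumPairsW, List.map_cons, List.sum_cons]
    rw [ih (s + 1 + 1) (by omega)]
    ring

-- histogram: summing count(d) * f d over d = 0..9 is summing f over the list
lemma hist_sum (f : Int → Int) (l : List Int) (h : ∀ x ∈ l, 0 ≤ x ∧ x < 10) :
    (([0,1,2,3,4,5,6,7,8,9] : List Int).map (fun d => (l.count d : Int) * f d)).sum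
      = (l.map f).sum := by
  induction l with
  | nil => simp
  | cons a t ih =>
    have ha := h a (by simp)
    have ht : ∀ x ∈ t, 0 ≤ x ∧ x < 10 := fun x hx => h x (by simp [hx])
    have key : (([0,1,2,3,4,5,6,7,8,9] : List Int).map
        (fun d => ((if a == d then 1 else 0 : Nat) : Int) * f d)).sum = f a := by
      obtain ⟨h0, h9⟩ := ha
      interval_cases a <;> simp
    calc (([0,1,2,3,4,5,6,7,8,9] : List Int).map (fun d => ((a :: t).count d : Int) * f d)).sum
        = (([0,1,2,3,4,5,6,7,8,9] : List Int).map
            (fun d => (t.count d : Int) * f d + ((if a == d then 1 else 0 : Nat) : Int) * f d)).sum := by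
          congr 1
          apply List.map_congr_left
          intro d _
          rw [List.count_cons]
          push_cast
          ring
      _ = (t.map f).sum + f a := by
          rw [← ih ht, ← key, ← List.sum_map_add]
      _ = ((a :: t).map f).sum := by simp; ring

lemma digit_bounds (c : Char) (h : c.isDigit) : 0 ≤ pyDigit c ∧ pyDigit c < 10 := by
  have := isDigit_toNat h
  unfold pyDigit
  omega

-- ===== VERDICT (by name: the statement is the Claim_ definition above) =====
set_option maxHeartbeats 1000000 in
theorem calc_dac_modulo10_spec : Claim_equal_calc_dac_modulo10 := by
  intro s _ hpre
  unfold Spec_calc_dac_modulo10 calc_dac_modulo10 calc_dac_modulo10_alt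
  have hm : ∀ a : Int, PySem.Int.mod a 2 = a % 2 :=
    fun a => PySem.Int.mod_eq_emod_of_pos (by norm_num)
  simp only [hm]
  have hdig : ∀ c ∈ s.toList, c.isDigit := by
    intro c hc
    unfold Pre_calc_dac_modulo10 at hpre
    simpa using List.all_eq_true.mp hpre c hc
  have hrev : ∀ c ∈ s.toList.reverse, c.isDigit := by
    intro c hc; exact hdig c (List.mem_reverse.mp hc)
  -- A's side: the fold is sumPairsW over the reversed digit list
  have hA := (foldA_sum s.toList.reverse hrev 0).2
  set n : Int := PySem.Str.len s with hn
  set digits := s.toList.map pyDigit with hdigits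
  set dob := (PySem.List.enumerate digits 0).filterMap
    (fun p => if (n - 1 - p.1) % 2 == 0 then some p.2 else none) with hdob
  set simp_ := (PySem.List.enumerate digits 0).filterMap
    (fun p => if (n - 1 - p.1) % 2 == 1 then some p.2 else none) with hsimp
  have hb : ∀ x ∈ digits, 0 ≤ x ∧ x < 10 := by
    intro x hx
    rw [hdigits, List.mem_map] at hx
    obtain ⟨c, hc, rfl⟩ := hx
    exact digit_bounds c (hdig c hc)
  have hmemsnd : ∀ (l : List Int) (pred : Int × Int → Option Int),
      (∀ p x, pred p = some x → x = p.2) →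
      ∀ x ∈ (PySem.List.enumerate l 0).filterMap pred, x ∈ l := by
    intro l pred hp x hx
    rw [List.mem_filterMap] at hx
    obtain ⟨p, hp', hpx⟩ := hx
    have := hp p x hpx
    subst this
    have hsnd := PySem.List.map_snd_enumerate (xs := l) (s := (0 : Int))
    rw [← hsnd]
    exact List.mem_map_of_mem hp'
  have hdobb : ∀ x ∈ dob, 0 ≤ x ∧ x < 10 := by
    intro x hx
    refine hb x (hmemsnd digits _ ?_ x hx)
    intro p y hy
    split_ifs at hy
    exact (Option.some_inj.mp hy).symm
  have hsimpb : ∀ x ∈ simp_, 0 ≤ x ∧ x < 10 := by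
    intro x hx
    refine hb x (hmemsnd digits _ ?_ x hx)
    intro p y hy
    split_ifs at hy
    exact (Option.some_inj.mp hy).symm
  -- the fold over pyRange 0 10 1 unwound to the two histogram sums
  have hrange : PySem.List.pyRange 0 10 1 = ([0,1,2,3,4,5,6,7,8,9] : List Int) := by decide
  have hfold : (PySem.List.pyRange 0 10 1).foldl
      (fun acc d => acc + (dob.count d : Int) * (2 * d - 9 * (if d > 4 then 1 else 0))
        + (simp_.count d : Int) * d) 0
      = (dob.map w2).sum + (simp_.map (fun x => x)).sum := by
    rw [hrange, ← hist_sum w2 dob hdobb, ← hist_sum (fun x => x) simp_ hsimpb]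
    simp [w2]
    ring
  -- the partition by (n-1-i) parity over digits = the index-parity partition over reversed digits
  have hmirror := enumerate_reverse digits
  have hlen : (digits.length : Int) = n := by
    rw [hdigits, hn]
    simp [PySem.Str.len_eq]
  have hdob' : dob.reverse = (PySem.List.enumerate digits.reverse 0).filterMap
      (fun p => if p.1 % 2 == 0 then some p.2 else none) := by
    rw [hmirror, List.filterMap_reverse, List.filterMap_map, hdob]
    rw [show ((fun p => if p.1 % 2 == 0 then some p.2 else none) ∘
        (fun p : Int × Int => ((digits.length : Int) - 1 - p.1, p.2)))
      = (fun p : Int × Int => if (n - 1 - p.1) % 2 == 0 then some p.2 else none) from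
        funext fun p => by simp [Function.comp, hlen]]
  have hsimp' : simp_.reverse = (PySem.List.enumerate digits.reverse 0).filterMap
      (fun p => if p.1 % 2 == 1 then some p.2 else none) := by
    rw [hmirror, List.filterMap_reverse, List.filterMap_map, hsimp]
    rw [show ((fun p => if p.1 % 2 == 1 then some p.2 else none) ∘
        (fun p : Int × Int => ((digits.length : Int) - 1 - p.1, p.2)))
      = (fun p : Int × Int => if (n - 1 - p.1) % 2 == 1 then some p.2 else none) from
        funext fun p => by simp [Function.comp, hlen]]
  have hpair := sumPairsW_enum digits.reverse 0 (by decide)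
  rw [← hdob', ← hsimp'] at hpair
  have hrevmap : s.toList.reverse.map pyDigit = digits.reverse := by
    rw [hdigits, List.map_reverse]
  rw [hrevmap] at hA
  simp only [List.map_reverse, List.sum_reverse] at hpair
  -- combine
  simp only [hA, zero_add, hfold, hpair]
  split <;> simp_all
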